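-- pv_equiv track=rewrite | github.com/sosoiskasmaslom/practica | hamming_code.py | encode_hamming
-- ===== SOURCE A (Python) =====
-- def calc_parity_bit(data, positions, length):
--
--     parity = 0
--     for i in range(positions, length, 2 * positions):
--         parity ^= sum(data[i:i + positions])
--     return parity % 2
--
-- def encode_hamming(data_bits):
--
--     data_len = len(data_bits)
--     r = 0
--     while (2**r) < (data_len + r + 1):
--         r += 1
--
--     hamming_code = []
--     j = 0
--     for i in range(1, data_len + r + 1):
--         if (i & (i - 1)) == 0:
--             hamming_code.append(0)
--         else:
--             hamming_code.append(int(data_bits[j]))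
--             j += 1
--
--     for i in range(r):
--         parity_bit_pos = 2**i - 1
--         parity_value = \
--         calc_parity_bit(hamming_code, 2**i, len(hamming_code))
--         hamming_code[parity_bit_pos] = parity_value
--
--     return ''.join(map(str, hamming_code))
-- ===== SOURCE B (Python) =====
-- def encode_hamming(data_bits):
--     n = len(data_bits)
--     r = 0
--     while (1 << r) < n + r + 1:
--         r += 1
--     total = n + r
--
--     # place the data bits; parity positions (powers of two, 1-based) start as 0
--     code = []
--     it = iter(data_bits)
--     for pos in range(1, total + 1):
--         if pos & (pos - 1) == 0:
--             code.append(0)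
--         else:
--             code.append(int(next(it)))
--
--     # prefix parities: pref[t] = XOR of the low bits of code[0:t], built once;
--     # each parity block is then combined from two table entries
--     pref = [0]
--     for v in code:
--         pref.append(pref[-1] ^ (v % 2))
--
--     for i in range(r):
--         p = 1 << i
--         par = 0
--         for start in range(p, total, 2 * p):
--             par ^= pref[min(start + p, total)] ^ pref[start]
--         code[p - 1] = par
--
--     return ''.join(map(str, code))
-- ===== Notes on version B (the rewrite author's own statement) =====
-- stated objective: alternative
-- what changed: B precomputes a prefix-parity (XOR) table over the assembled code word once and combines every parity block from two table entries, instead of A's per-parity-bit slice-sum scans over the whole code word; measured runtimes are comparable.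
import Mathlib
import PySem

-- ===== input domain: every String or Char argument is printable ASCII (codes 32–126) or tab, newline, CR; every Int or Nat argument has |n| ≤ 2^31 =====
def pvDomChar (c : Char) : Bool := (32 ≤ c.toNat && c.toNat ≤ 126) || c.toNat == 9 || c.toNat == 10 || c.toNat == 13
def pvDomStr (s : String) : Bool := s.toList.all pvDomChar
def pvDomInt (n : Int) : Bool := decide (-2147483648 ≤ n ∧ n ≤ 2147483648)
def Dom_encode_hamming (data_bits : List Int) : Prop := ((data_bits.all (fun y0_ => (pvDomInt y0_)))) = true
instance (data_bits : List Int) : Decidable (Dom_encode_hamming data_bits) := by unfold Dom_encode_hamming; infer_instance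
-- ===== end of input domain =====

-- B builds a prefix-parity (XOR) table once and combines each parity block from two
-- table entries, where A re-scans the code word with slice sums for every parity bit.

-- ===== PORT A =====
-- the 'while (2**r) < (data_len + r + 1): r += 1' loop (identical in Source A and Source B, with
-- 1 << r in Source B), ported with structural fuel; fuel n+2 always suffices: the loop leaves
-- as soon as 2^r >= n+r+1, which holds at r = n+1 at the latest, so the fuel-0 branch is
-- never the one that produces the result.
def hammingR (fuel n r : Nat) : Nat :=
  match fuel with
  | 0 => r
  | fuel + 1 => if 2 ^ r < n + r + 1 then hammingR fuel n (r + 1) else r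

def calc_parity_bit (data : List Int) (positions : Int) (length : Int) : Int :=
  PySem.Int.mod
    ((PySem.List.pyRange positions length (2 * positions)).foldl
      (fun parity i =>
        PySem.Int.bxor parity (PySem.List.slice data (some i) (some (i + positions))).sum)
      0) 2

def encode_hamming (data_bits : List Int) : String :=
  let r : Nat := hammingR (data_bits.length + 2) data_bits.length 0
  let built :=
    (PySem.List.pyRange 1 ((data_bits.length : Int) + (r : Int) + 1) 1).foldl
      (fun (st : List Int × Int) i =>
        if PySem.Int.band i (i - 1) = 0 then (st.1 ++ [(0 : Int)], st.2)
        else (st.1 ++ [PySem.List.pyGetD data_bits st.2 0], st.2 + 1))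
      ([], 0)
  let hamming_code :=
    (List.range r).foldl
      (fun code i =>
        PySem.List.pySetD code ((2 : Int) ^ i - 1)
          (calc_parity_bit code ((2 : Int) ^ i) (PySem.List.len code)))
      built.1
  PySem.Str.join "" (hamming_code.map PySem.Int.toStr)

-- ===== PORT B =====
def altBuild (rest : List Int) (pos cnt : Nat) : List Int :=
  match cnt with
  | 0 => []
  | c + 1 =>
    if pos &&& (pos - 1) = 0 then 0 :: altBuild rest (pos + 1) c
    else rest.headI :: altBuild rest.tail (pos + 1) c

def altPref (code : List Int) (acc : Int) : List Int :=
  match code with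
  | [] => [acc]
  | v :: vs => acc :: altPref vs (PySem.Int.bxor acc (PySem.Int.mod v 2))

def encode_hamming_alt (data_bits : List Int) : String :=
  let n := data_bits.length
  let r := hammingR (n + 2) n 0
  let total := n + r
  let code := altBuild data_bits 1 total
  let pref := altPref code 0
  let code2 :=
    (List.range r).foldl
      (fun c i =>
        let p : Nat := 2 ^ i
        let par :=
          (PySem.List.pyRange (p : Int) (total : Int) (2 * (p : Int))).foldl
            (fun par s =>
              PySem.Int.bxor par
                (PySem.Int.bxor (PySem.List.pyGetD pref (min (s + (p : Int)) (total : Int)) 0)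
                  (PySem.List.pyGetD pref s 0)))
            0
        PySem.List.pySetD c ((p : Int) - 1) par)
      code
  PySem.Str.join "" (code2.map PySem.Int.toStr)

-- ===== PRECONDITION & SPEC =====
def Spec_encode_hamming (data_bits : List Int) (out : String) : Prop := out = encode_hamming_alt data_bits
instance (data_bits : List Int) (out : String) : Decidable (Spec_encode_hamming data_bits out) := by unfold Spec_encode_hamming; infer_instance

-- ===== CLAIM (what is proved, stated in full; the proofs are below) =====
def Claim_equal_encode_hamming : Prop := ∀ (data_bits : List Int), Dom_encode_hamming data_bits → Spec_encode_hamming data_bits (encode_hamming data_bits)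

-- ===== LEMMAS AND PROOFS =====

theorem pv_nat_parity (a b : Nat) : (a ^^^ b) % 2 = (a % 2 + b % 2) % 2 := by
  rw [Nat.xor_mod_two_eq, Nat.add_mod]

theorem pv_poscast (X : Nat) : ((X : Int)) % 2 = ((X % 2 : Nat) : Int) := by omega

theorem pv_negcast (X : Nat) : (-(X : Int) - 1) % 2 = (((X + 1) % 2 : Nat) : Int) := by omega

theorem pv_bxor_mod2 (p q : Nat) (hp : p < 2) (hq : q < 2) :
    PySem.Int.bxor (p : Int) (q : Int) = (((p + q) % 2 : Nat) : Int) := by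
  interval_cases p <;> interval_cases q <;> decide

theorem pv_lsb_bxor (x y : Int) :
    PySem.Int.mod (PySem.Int.bxor x y) 2
      = PySem.Int.bxor (PySem.Int.mod x 2) (PySem.Int.mod y 2) := by
  have h2 : (0:Int) < 2 := by norm_num
  rw [PySem.Int.mod_eq_emod_of_pos h2, PySem.Int.mod_eq_emod_of_pos h2,
    PySem.Int.mod_eq_emod_of_pos h2]
  by_cases hx : 0 ≤ x <;> by_cases hy : 0 ≤ y
  · obtain ⟨a, rfl⟩ : ∃ a : Nat, x = (a : Int) := ⟨x.toNat, (Int.toNat_of_nonneg hx).symm⟩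
    obtain ⟨b, rfl⟩ : ∃ b : Nat, y = (b : Int) := ⟨y.toNat, (Int.toNat_of_nonneg hy).symm⟩
    rw [show PySem.Int.bxor (a : Int) (b : Int) = ((a ^^^ b : Nat) : Int) from
      PySem.Int.bxor_natCast a b]
    rw [pv_poscast (a ^^^ b), pv_poscast a, pv_poscast b,
      pv_bxor_mod2 _ _ (Nat.mod_lt _ (by norm_num)) (Nat.mod_lt _ (by norm_num))]
    have hX := pv_nat_parity a b
    push_cast
    omega
  · obtain ⟨a, rfl⟩ : ∃ a : Nat, x = (a : Int) := ⟨x.toNat, (Int.toNat_of_nonneg hx).symm⟩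
    obtain ⟨m, rfl⟩ : ∃ m : Nat, y = -(m : Int) - 1 := ⟨(-y - 1).toNat, by omega⟩
    have hbx : PySem.Int.bxor (a : Int) (-(m : Int) - 1) = -((a ^^^ m : Nat) : Int) - 1 := by
      simp only [PySem.Int.bxor]
      rw [if_pos hx, if_neg hy]
      have h1 : (-(-(m:Int) - 1) - 1).toNat = m := by omega
      have h2' : ((a:Int)).toNat = a := by omega
      rw [h1, h2']
    rw [hbx, pv_negcast (a ^^^ m), pv_poscast a, pv_negcast m,
      pv_bxor_mod2 _ _ (Nat.mod_lt _ (by norm_num)) (Nat.mod_lt _ (by norm_num))]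
    have hX := pv_nat_parity a m
    push_cast
    omega
  · obtain ⟨a, rfl⟩ : ∃ a : Nat, x = -(a : Int) - 1 := ⟨(-x - 1).toNat, by omega⟩
    obtain ⟨b, rfl⟩ : ∃ b : Nat, y = (b : Int) := ⟨y.toNat, (Int.toNat_of_nonneg hy).symm⟩
    have hbx : PySem.Int.bxor (-(a : Int) - 1) (b : Int) = -((a ^^^ b : Nat) : Int) - 1 := by
      simp only [PySem.Int.bxor]
      rw [if_neg hx, if_pos hy]
      have h1 : (-(-(a:Int) - 1) - 1).toNat = a := by omega
      have h2' : ((b:Int)).toNat = b := by omega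
      rw [h1, h2']
    rw [hbx, pv_negcast (a ^^^ b), pv_negcast a, pv_poscast b,
      pv_bxor_mod2 _ _ (Nat.mod_lt _ (by norm_num)) (Nat.mod_lt _ (by norm_num))]
    have hX := pv_nat_parity a b
    push_cast
    omega
  · obtain ⟨a, rfl⟩ : ∃ a : Nat, x = -(a : Int) - 1 := ⟨(-x - 1).toNat, by omega⟩
    obtain ⟨b, rfl⟩ : ∃ b : Nat, y = -(b : Int) - 1 := ⟨(-y - 1).toNat, by omega⟩
    have hbx : PySem.Int.bxor (-(a : Int) - 1) (-(b : Int) - 1) = ((a ^^^ b : Nat) : Int) := by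
      simp only [PySem.Int.bxor]
      rw [if_neg hx, if_neg hy]
      have h1 : (-(-(a:Int) - 1) - 1).toNat = a := by omega
      have h2' : (-(-(b:Int) - 1) - 1).toNat = b := by omega
      rw [h1, h2']
    rw [hbx, pv_poscast (a ^^^ b), pv_negcast a, pv_negcast b,
      pv_bxor_mod2 _ _ (Nat.mod_lt _ (by norm_num)) (Nat.mod_lt _ (by norm_num))]
    have hX := pv_nat_parity a b
    push_cast
    omega

theorem pv_lsb_add (x y : Int) :
    PySem.Int.mod (x + y) 2 = PySem.Int.bxor (PySem.Int.mod x 2) (PySem.Int.mod y 2) := by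
  have h2 : (0:Int) < 2 := by norm_num
  rw [PySem.Int.mod_eq_emod_of_pos h2, PySem.Int.mod_eq_emod_of_pos h2,
    PySem.Int.mod_eq_emod_of_pos h2, Int.add_emod]
  rcases Int.emod_two_eq_zero_or_one x with hx | hx <;>
    rcases Int.emod_two_eq_zero_or_one y with hy | hy <;> rw [hx, hy] <;> decide

theorem pv_mod01 (x : Int) : PySem.Int.mod x 2 = 0 ∨ PySem.Int.mod x 2 = 1 :=
  PySem.Int.mod_two_eq x

theorem pv_bxor01 {a b : Int} (ha : a = 0 ∨ a = 1) (hb : b = 0 ∨ b = 1) :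
    PySem.Int.bxor a b = 0 ∨ PySem.Int.bxor a b = 1 := by
  rcases ha with rfl | rfl <;> rcases hb with rfl | rfl <;> decide

theorem pv_fold01 (l : List Int) : ∀ a : Int, (a = 0 ∨ a = 1) →
    (l.foldl (fun x v => PySem.Int.bxor x (PySem.Int.mod v 2)) a = 0 ∨
     l.foldl (fun x v => PySem.Int.bxor x (PySem.Int.mod v 2)) a = 1) := by
  induction l with
  | nil => intro a ha; exact ha
  | cons v t ih =>
    intro a ha
    simp only [List.foldl_cons]
    exact ih _ (pv_bxor01 ha (pv_mod01 v))

theorem pv_fold_shift (l : List Int) : ∀ a : Int, (a = 0 ∨ a = 1) →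
    l.foldl (fun x v => PySem.Int.bxor x (PySem.Int.mod v 2)) a
      = PySem.Int.bxor a (l.foldl (fun x v => PySem.Int.bxor x (PySem.Int.mod v 2)) 0) := by
  induction l with
  | nil =>
    intro a ha
    simp only [List.foldl_nil]
    rcases ha with rfl | rfl <;> decide
  | cons v t ih =>
    intro a ha
    simp only [List.foldl_cons]
    rw [ih _ (pv_bxor01 ha (pv_mod01 v)), ih _ (pv_bxor01 (Or.inl rfl) (pv_mod01 v))]
    rcases pv_mod01 v with hm | hm <;> rw [hm] <;>
      rcases pv_fold01 t 0 (Or.inl rfl) with hF | hF <;> rw [hF] <;>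
      rcases ha with rfl | rfl <;> decide

theorem pv_sum_parity (l : List Int) :
    PySem.Int.mod l.sum 2 = l.foldl (fun x v => PySem.Int.bxor x (PySem.Int.mod v 2)) 0 := by
  induction l with
  | nil => simp only [List.sum_nil, List.foldl_nil]; decide
  | cons v t ih =>
    simp only [List.sum_cons, List.foldl_cons]
    rw [pv_lsb_add, ih, pv_fold_shift t _ (pv_bxor01 (Or.inl rfl) (pv_mod01 v))]
    have h0 : PySem.Int.bxor 0 (PySem.Int.mod v 2) = PySem.Int.mod v 2 := by
      rcases pv_mod01 v with hm | hm <;> rw [hm] <;> decide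
    rw [h0]

theorem pv_push_mod (l : List Int) (f : Int → Int) : ∀ a : Int,
    PySem.Int.mod (l.foldl (fun acc s => PySem.Int.bxor acc (f s)) a) 2
      = l.foldl (fun acc s => PySem.Int.bxor acc (PySem.Int.mod (f s) 2)) (PySem.Int.mod a 2) := by
  induction l with
  | nil => intro a; simp only [List.foldl_nil]
  | cons v t ih =>
    intro a
    simp only [List.foldl_cons]
    rw [ih, pv_lsb_bxor]

theorem pv_altPref_getD (c : List Int) : ∀ (a : Int) (t : Nat), t ≤ c.length →
    (altPref c a).getD t 0
      = (c.take t).foldl (fun x v => PySem.Int.bxor x (PySem.Int.mod v 2)) a := by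
  induction c with
  | nil =>
    intro a t ht
    have ht0 : t = 0 := by simpa using ht
    subst ht0
    simp [altPref]
  | cons v vs ih =>
    intro a t ht
    cases t with
    | zero => simp [altPref]
    | succ t' =>
      simp only [altPref, List.getD_cons_succ, List.take_succ_cons, List.foldl_cons]
      exact ih _ t' (by simpa using ht)

theorem pv_take_congr {α : Type} (l : List α) (m n : Nat)
    (h : min m l.length = min n l.length) : l.take m = l.take n := by
  apply List.ext_getElem?
  intro i
  rw [List.getElem?_take, List.getElem?_take]
  split_ifs with h1 h2 h2
  · rfl
  · rw [List.getElem?_eq_none (by omega)]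
  · rw [List.getElem?_eq_none (by omega)]
  · rfl

theorem pv_pref_diff (c : List Int) (s e : Nat) (hse : s ≤ e) (_he : e ≤ c.length) :
    PySem.Int.bxor
        ((c.take e).foldl (fun x v => PySem.Int.bxor x (PySem.Int.mod v 2)) 0)
        ((c.take s).foldl (fun x v => PySem.Int.bxor x (PySem.Int.mod v 2)) 0)
      = PySem.Int.mod ((c.drop s).take (e - s)).sum 2 := by
  have hsplit : c.take (s + (e - s)) = c.take s ++ (c.drop s).take (e - s) := List.take_add
  rw [show s + (e - s) = e from by omega] at hsplit
  rw [pv_sum_parity, hsplit, List.foldl_append]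
  rw [pv_fold_shift ((c.drop s).take (e - s)) _ (pv_fold01 _ 0 (Or.inl rfl))]
  rcases pv_fold01 (c.take s) 0 (Or.inl rfl) with hP | hP <;> rw [hP] <;>
    rcases pv_fold01 ((c.drop s).take (e - s)) 0 (Or.inl rfl) with hM | hM <;> rw [hM] <;> decide

theorem pv_headI_drop (l : List Int) : ∀ j : Nat, (l.drop j).headI = l.getD j 0 := by
  induction l with
  | nil => intro j; simp
  | cons v vs ih =>
    intro j
    cases j with
    | zero => simp
    | succ j' => simpa using ih j'

theorem pv_altBuild_succ (rest : List Int) (pos c : Nat) :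
    altBuild rest pos (c + 1)
      = if pos &&& (pos - 1) = 0 then 0 :: altBuild rest (pos + 1) c
        else rest.headI :: altBuild rest.tail (pos + 1) c := rfl

theorem pv_altBuild_length : ∀ (cnt : Nat) (rest : List Int) (pos : Nat),
    (altBuild rest pos cnt).length = cnt := by
  intro cnt
  induction cnt with
  | zero => intro rest pos; simp [altBuild]
  | succ c ih =>
    intro rest pos
    rw [pv_altBuild_succ]
    split <;> simp [ih]

theorem pv_build_eq (data : List Int) : ∀ (cnt pos j : Nat) (acc : List Int), 1 ≤ pos →
    ∃ j2 : Int,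
      (PySem.List.pyRange (pos : Int) ((pos : Int) + (cnt : Int)) 1).foldl
        (fun (st : List Int × Int) i =>
          if PySem.Int.band i (i - 1) = 0 then (st.1 ++ [(0 : Int)], st.2)
          else (st.1 ++ [PySem.List.pyGetD data st.2 0], st.2 + 1))
        (acc, (j : Int))
      = (acc ++ altBuild (data.drop j) pos cnt, j2) := by
  intro cnt
  induction cnt with
  | zero =>
    intro pos j acc hpos
    refine ⟨(j : Int), ?_⟩
    rw [PySem.List.pyRange_one_eq_nil (by omega)]
    simp [altBuild]
  | succ c ih =>
    intro pos j acc hpos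
    rw [PySem.List.pyRange_one_cons (by push_cast; omega)]
    simp only [List.foldl_cons]
    have hcast : (pos : Int) - 1 = ((pos - 1 : Nat) : Int) := by
      rw [Nat.cast_sub hpos]; simp
    have hbound : (pos : Int) + ((c + 1 : Nat) : Int) = ((pos + 1 : Nat) : Int) + (c : Int) := by
      push_cast; ring
    have hstart : (pos : Int) + 1 = ((pos + 1 : Nat) : Int) := by push_cast; ring
    by_cases hb : pos &&& (pos - 1) = 0
    · have hcond : PySem.Int.band (pos : Int) ((pos : Int) - 1) = 0 := by
        rw [hcast, PySem.Int.band_natCast]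
        exact_mod_cast congrArg (Nat.cast (R := Int)) hb
      rw [if_pos hcond, hbound, hstart]
      obtain ⟨j2, h2⟩ := ih (pos + 1) j (acc ++ [0]) (by omega)
      refine ⟨j2, ?_⟩
      rw [h2, pv_altBuild_succ, if_pos hb]
      simp
    · have hcond : ¬ PySem.Int.band (pos : Int) ((pos : Int) - 1) = 0 := by
        rw [hcast, PySem.Int.band_natCast]
        intro hc
        exact hb (by exact_mod_cast hc)
      rw [if_neg hcond, hbound, hstart]
      have hget : PySem.List.pyGetD data ((j : Nat) : Int) 0 = (data.drop j).headI := by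
        rw [PySem.List.pyGetD_natCast, ← pv_headI_drop]
      have hj1 : ((j : Nat) : Int) + 1 = ((j + 1 : Nat) : Int) := by push_cast; ring
      obtain ⟨j2, h2⟩ := ih (pos + 1) (j + 1) (acc ++ [(data.drop j).headI]) (by omega)
      refine ⟨j2, ?_⟩
      rw [hget, hj1, h2, pv_altBuild_succ, if_neg hb, List.tail_drop]
      simp

theorem pv_block_eq' (code0 : List Int) (total : Nat) (hlen : code0.length = total)
    (p u : Nat) (hu : u < total) :
    PySem.Int.mod ((code0.drop u).take p).sum 2
      = PySem.Int.bxor ((altPref code0 0).getD (min (u + p) total) 0)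
          ((altPref code0 0).getD u 0) := by
  rw [pv_altPref_getD code0 0 (min (u + p) total) (by omega),
    pv_altPref_getD code0 0 u (by omega)]
  rw [pv_pref_diff code0 u (min (u + p) total) (by omega) (by omega)]
  have htake : (code0.drop u).take p = (code0.drop u).take (min (u + p) total - u) := by
    apply pv_take_congr
    rw [List.length_drop, hlen]
    omega
  rw [htake]

theorem pv_loop (code0 : List Int) (total : Nat) (hlen : code0.length = total) :
    ∀ k : Nat,
      ((List.range k).foldl
          (fun code i =>
            PySem.List.pySetD code ((2 : Int) ^ i - 1)
              (calc_parity_bit code ((2 : Int) ^ i) (PySem.List.len code))) code0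
        = (List.range k).foldl
          (fun c i =>
            PySem.List.pySetD c (((2 ^ i : Nat) : Int) - 1)
              ((PySem.List.pyRange ((2 ^ i : Nat) : Int) ((total : Nat) : Int)
                  (2 * ((2 ^ i : Nat) : Int))).foldl
                (fun par s =>
                  PySem.Int.bxor par
                    (PySem.Int.bxor
                      (PySem.List.pyGetD (altPref code0 0)
                        (min (s + ((2 ^ i : Nat) : Int)) ((total : Nat) : Int)) 0)
                      (PySem.List.pyGetD (altPref code0 0) s 0))) 0)) code0)
      ∧ ((List.range k).foldl
          (fun code i =>
            PySem.List.pySetD code ((2 : Int) ^ i - 1)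
              (calc_parity_bit code ((2 : Int) ^ i) (PySem.List.len code))) code0).length = total
      ∧ ((List.range k).foldl
          (fun code i =>
            PySem.List.pySetD code ((2 : Int) ^ i - 1)
              (calc_parity_bit code ((2 : Int) ^ i) (PySem.List.len code))) code0).drop (2 ^ k - 1)
          = code0.drop (2 ^ k - 1) := by
  intro k
  induction k with
  | zero =>
    refine ⟨rfl, by simpa using hlen, by norm_num⟩
  | succ k ih =>
    obtain ⟨hAB, hlenA, hdrop⟩ := ih
    simp only [List.range_succ, List.foldl_append, List.foldl_cons, List.foldl_nil]
    set Ak := (List.range k).foldl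
      (fun code i =>
        PySem.List.pySetD code ((2 : Int) ^ i - 1)
          (calc_parity_bit code ((2 : Int) ^ i) (PySem.List.len code))) code0 with hAk
    have h1 : 1 ≤ 2 ^ k := Nat.one_le_two_pow
    have hpow : 2 ^ (k + 1) = 2 * 2 ^ k := by rw [pow_succ]; ring
    -- the written value is the same
    have hval : calc_parity_bit Ak ((2 : Int) ^ k) (PySem.List.len Ak)
        = (PySem.List.pyRange ((2 ^ k : Nat) : Int) ((total : Nat) : Int)
            (2 * ((2 ^ k : Nat) : Int))).foldl
            (fun par s =>
              PySem.Int.bxor par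
                (PySem.Int.bxor
                  (PySem.List.pyGetD (altPref code0 0)
                    (min (s + ((2 ^ k : Nat) : Int)) ((total : Nat) : Int)) 0)
                  (PySem.List.pyGetD (altPref code0 0) s 0))) 0 := by
      have hlenAk : PySem.List.len Ak = ((total : Nat) : Int) := by
        rw [PySem.List.len_eq, hlenA]
      unfold calc_parity_bit
      rw [hlenAk]
      rw [show ((2 : Int) ^ k) = ((2 ^ k : Nat) : Int) from by push_cast; ring]
      rw [pv_push_mod]
      rw [show PySem.Int.mod 0 2 = 0 from by decide]
      apply PySem.List.foldl_congr_mem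
      intro acc x hx
      have hs : (0 : Int) < 2 * ((2 ^ k : Nat) : Int) := by positivity
      have hmem := (PySem.List.mem_pyRange_iff_of_pos hs x).mp hx
      obtain ⟨hax, hxb, -⟩ := hmem
      have hx0 : (0 : Int) ≤ x := le_trans (by positivity) hax
      obtain ⟨u, rfl⟩ : ∃ u : Nat, x = (u : Int) := ⟨x.toNat, by omega⟩
      have hup : 2 ^ k ≤ u := by exact_mod_cast hax
      have hut : u < total := by exact_mod_cast hxb
      congr 1
      have hdru : Ak.drop u = code0.drop u := by
        rw [show u = (2 ^ k - 1) + (u - (2 ^ k - 1)) from by omega, ← List.drop_drop,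
          hdrop, List.drop_drop]
      rw [PySem.List.slice_natCast_add, hdru]
      rw [show (min ((u : Int) + ((2 ^ k : Nat) : Int)) ((total : Nat) : Int))
            = ((min (u + 2 ^ k) total : Nat) : Int) from by norm_cast]
      rw [PySem.List.pyGetD_natCast, PySem.List.pyGetD_natCast]
      exact pv_block_eq' code0 total hlen (2 ^ k) u hut
    refine ⟨?_, ?_, ?_⟩
    · rw [← hAB, hval,
        show ((2 : Int) ^ k - 1) = (((2 ^ k : Nat) : Int) - 1) from by norm_cast]
    · rw [PySem.List.length_pySetD, hlenA]
    · rw [show ((2 : Int) ^ k - 1) = ((2 ^ k - 1 : Nat) : Int) from by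
        rw [Nat.cast_sub h1]; push_cast; ring]
      rw [PySem.List.pySetD_natCast]
      rw [List.drop_set]
      rw [if_pos (by omega)]
      rw [show 2 ^ (k + 1) - 1 = (2 ^ k - 1) + (2 ^ (k + 1) - 2 ^ k) from by omega,
        ← List.drop_drop, hdrop, List.drop_drop]

theorem pv_main (d : List Int) : encode_hamming d = encode_hamming_alt d := by
  simp only [encode_hamming, encode_hamming_alt]
  obtain ⟨j2, hb⟩ := pv_build_eq d (d.length + hammingR (d.length + 2) d.length 0) 1 0 [] (le_refl 1)
  rw [List.drop_zero] at hb
  simp only [Nat.cast_one, Nat.cast_zero, Nat.cast_add] at hb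
  rw [show ((d.length : Int) + ((hammingR (d.length + 2) d.length 0 : Nat) : Int) + 1)
        = 1 + ((d.length : Int) + ((hammingR (d.length + 2) d.length 0 : Nat) : Int)) from by ring]
  rw [hb]
  simp only [List.nil_append]
  have hmain := (pv_loop (altBuild d 1 (d.length + hammingR (d.length + 2) d.length 0))
      (d.length + hammingR (d.length + 2) d.length 0)
      (pv_altBuild_length _ _ _) (hammingR (d.length + 2) d.length 0)).1
  rw [hmain]

-- ===== VERDICT (by name: the statement is the Claim_ definition above) =====
theorem encode_hamming_spec : Claim_equal_encode_hamming := by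
  intro data_bits _
  show encode_hamming data_bits = encode_hamming_alt data_bits
  exact pv_main data_bits
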